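-- pv_equiv track=rewrite | github.com/Gayeon6423/Improvement-of-the-Coreference-Resolution-model | augmentation/utils_filtering.py | extract_coreference_sentences_ordered
-- ===== SOURCE A (Python) =====
-- def extract_coreference_sentences_ordered(ontonotes_sentence, coreference_offsets):
--     """
--     Extracts sentences containing the words at specified coreference offsets
--     while preserving the order of occurrence.
--
--     Args:
--     ontonotes_sentence (list of lists): The sentence in OntoNotes format.
--     coreference_offsets (list of lists): Coreference offsets indicating word positions.
--
--     Returns:
--     list of lists: Ordered sentences containing the coreference words.
--     """
--     # 전체 단어 위치를 저장하는 리스트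
--     unique_sentences = []
--
--     # 각 오프셋에 해당하는 문장을 추출
--     for offset in coreference_offsets:
--         for sentence_idx, sentence in enumerate(ontonotes_sentence):
--             # 각 문장의 시작과 끝 인덱스를 계산
--             sentence_start = sum(len(s) for s in ontonotes_sentence[:sentence_idx])
--             sentence_end = sentence_start + len(sentence) - 1
--
--             # 오프셋이 해당 문장의 범위 내에 있을 경우 추가 (이미 추가된 문장은 건너뜀)
--             if sentence_start <= offset[0] <= sentence_end and sentence not in unique_sentences:
--                 unique_sentences.append(sentence)
--                 break
--
--     return unique_sentences
-- ===== SOURCE B (Python) =====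
-- def extract_coreference_sentences_ordered(ontonotes_sentence, coreference_offsets):
--     """
--     Extracts sentences containing the words at specified coreference offsets
--     while preserving the order of occurrence.
--     """
--     # One pass: map each global word position to its sentence.
--     pos_to_sent = {}
--     pos = 0
--     for sentence in ontonotes_sentence:
--         for _ in sentence:
--             pos_to_sent[pos] = sentence
--             pos += 1
--
--     result = []
--     seen = set()
--     for offset in coreference_offsets:
--         sentence = pos_to_sent.get(offset[0])
--         if sentence is not None and tuple(sentence) not in seen:
--             seen.add(tuple(sentence))
--             result.append(sentence)
--     return result
-- ===== Notes on version B (the rewrite author's own statement) =====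
-- stated objective: faster
-- what changed: B builds a position-to-sentence dict in one pass and looks each offset up in O(1) with a set for value-dedup, replacing A's per-offset rescan that recomputes prefix sums of sentence lengths (O(m*n^2)).
-- outside the precondition, e.g. on extract_coreference_sentences_ordered([], [[]]): A returns [], B raises IndexError
import Mathlib
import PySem

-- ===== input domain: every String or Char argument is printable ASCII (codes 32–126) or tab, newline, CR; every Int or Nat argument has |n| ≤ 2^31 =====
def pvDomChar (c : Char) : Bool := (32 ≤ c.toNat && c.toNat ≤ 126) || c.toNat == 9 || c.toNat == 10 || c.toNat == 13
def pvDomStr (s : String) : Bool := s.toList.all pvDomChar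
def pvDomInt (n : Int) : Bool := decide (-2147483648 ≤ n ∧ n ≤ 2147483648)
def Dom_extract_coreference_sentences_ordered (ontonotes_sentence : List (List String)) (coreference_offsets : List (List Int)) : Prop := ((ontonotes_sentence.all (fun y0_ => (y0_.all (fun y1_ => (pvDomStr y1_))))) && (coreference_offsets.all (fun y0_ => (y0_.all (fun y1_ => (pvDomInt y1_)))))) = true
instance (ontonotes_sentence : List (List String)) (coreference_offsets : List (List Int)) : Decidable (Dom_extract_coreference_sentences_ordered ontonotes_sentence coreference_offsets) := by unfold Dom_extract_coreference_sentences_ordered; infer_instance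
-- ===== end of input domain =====

-- B replaces A's per-offset rescan with prefix-sum recomputation (O(m*n^2)) by a
-- position→sentence dict built once plus O(1) lookups and a set for value-dedup (O(N+m)).

-- ===== PORT A =====
-- sum(len(s) for s in ontonotes_sentence[:sentence_idx])
def pySumLenA (l : List (List String)) : Int :=
  l.foldl (fun a s => a + (s.length : Int)) 0

-- inner 'for sentence_idx, sentence in enumerate(ontonotes_sentence)' loop (with break)
def goA (onto : List (List String)) (off0 : Int) (uniq : List (List String)) :
    List (List String) → Nat → List (List String)
  | [], _ => uniq
  | s :: rest, i =>
    let sentence_start := pySumLenA (onto.take i)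
    let sentence_end := sentence_start + (s.length : Int) - 1
    if sentence_start ≤ off0 ∧ off0 ≤ sentence_end ∧ s ∉ uniq then
      uniq ++ [s]
    else goA onto off0 uniq rest (i + 1)

def extract_coreference_sentences_ordered (ontonotes_sentence : List (List String)) (coreference_offsets : List (List Int)) : List (List String) :=
  coreference_offsets.foldl (fun uniq offset =>
    match PySem.List.pyGet? offset 0 with   -- offset[0]; none = IndexError, excluded by Pre_
    | some o => goA ontonotes_sentence o uniq ontonotes_sentence 0
    | none => uniq) []

-- ===== PORT B =====
-- pos_to_sent built in one pass: for sentence in ...: for _ in sentence: d[pos] = sentence; pos += 1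
def buildB (onto : List (List String)) : PySem.Dict Int (List String) × Int :=
  onto.foldl (fun st sentence =>
    sentence.foldl (fun st2 _ => (st2.1.insert st2.2 sentence, st2.2 + 1)) st)
    (PySem.Dict.empty, 0)

def extract_coreference_sentences_ordered_alt (ontonotes_sentence : List (List String)) (coreference_offsets : List (List Int)) : List (List String) :=
  let d := (buildB ontonotes_sentence).1
  (coreference_offsets.foldl (fun st offset =>
    match PySem.List.pyGet? offset 0 with   -- offset[0]; none = IndexError, excluded by Pre_
    | some o =>
      match d.get? o with
      | some sentence =>
        if PySem.Set.contains st.2 sentence then st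
        else (st.1 ++ [sentence], PySem.Set.add st.2 sentence)
      | none => st
    | none => st)
    (([] : List (List String)), (PySem.Set.empty : PySem.Set (List String)))).1

-- ===== PRECONDITION & SPEC =====
-- Pre_ excludes inputs containing an empty inner offset list: there B raises IndexError on
-- offset[0], and A raises too unless ontonotes_sentence is empty (then A's inner loop never
-- reaches the offset[0] subscript and A returns []).
def Pre_extract_coreference_sentences_ordered (ontonotes_sentence : List (List String)) (coreference_offsets : List (List Int)) : Prop :=
  ∀ off ∈ coreference_offsets, off ≠ []
instance (ontonotes_sentence : List (List String)) (coreference_offsets : List (List Int)) : Decidable (Pre_extract_coreference_sentences_ordered ontonotes_sentence coreference_offsets) := by unfold Pre_extract_coreference_sentences_ordered; infer_instance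

def pvWitness_extract_coreference_sentences_ordered : List (List String) × List (List Int) :=
  ([["a", "b"], ["c"]], [[2], [0]])

def Spec_extract_coreference_sentences_ordered (ontonotes_sentence : List (List String)) (coreference_offsets : List (List Int)) (out : List (List String)) : Prop := out = extract_coreference_sentences_ordered_alt ontonotes_sentence coreference_offsets
instance (ontonotes_sentence : List (List String)) (coreference_offsets : List (List Int)) (out : List (List String)) : Decidable (Spec_extract_coreference_sentences_ordered ontonotes_sentence coreference_offsets out) := by unfold Spec_extract_coreference_sentences_ordered; infer_instance

-- ===== CLAIM (what is proved, stated in full; the proofs are below) =====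
def Claim_equal_extract_coreference_sentences_ordered : Prop := ∀ (ontonotes_sentence : List (List String)) (coreference_offsets : List (List Int)), Dom_extract_coreference_sentences_ordered ontonotes_sentence coreference_offsets → Pre_extract_coreference_sentences_ordered ontonotes_sentence coreference_offsets → Spec_extract_coreference_sentences_ordered ontonotes_sentence coreference_offsets (extract_coreference_sentences_ordered ontonotes_sentence coreference_offsets)

-- ===== LEMMAS AND PROOFS =====
theorem foldl_add_shift (l : List (List String)) (a : Int) :
    l.foldl (fun a s => a + (s.length : Int)) a = a + pySumLenA l := by
  induction l generalizing a with
  | nil => simp [pySumLenA]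
  | cons s rest ih =>
    simp only [pySumLenA, List.foldl_cons] at *
    rw [ih, ih (0 + _)]; ring
theorem pySumLenA_app (l t : List (List String)) :
    pySumLenA (l ++ t) = pySumLenA l + pySumLenA t := by
  simp only [pySumLenA, List.foldl_append]
  rw [foldl_add_shift]; rfl
theorem pySumLenA_nonneg (l : List (List String)) : 0 ≤ pySumLenA l := by
  induction l with
  | nil => simp [pySumLenA]
  | cons s rest ih =>
    simp only [pySumLenA, List.foldl_cons, zero_add] at *
    rw [foldl_add_shift]
    have : (0:Int) ≤ (s.length : Int) := by positivity
    simp only [pySumLenA] at *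
    omega
theorem pySumLenA_take_mono (onto : List (List String)) (i : Nat) :
    pySumLenA (onto.take i) ≤ pySumLenA (onto.take (i + 1)) := by
  rw [List.take_add_one, pySumLenA_app]
  have h : 0 ≤ pySumLenA onto[i]?.toList := pySumLenA_nonneg _
  omega
def findMatch (o : Int) : List (List String) → Int → Option (List String)
  | [], _ => none
  | s :: rest, st =>
    if st ≤ o ∧ o < st + (s.length : Int) then some s
    else findMatch o rest (st + (s.length : Int))
theorem goA_no_match (onto : List (List String)) (o : Int) (uniq : List (List String))
    (l : List (List String)) (i : Nat) (h : o < pySumLenA (onto.take i)) :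
    goA onto o uniq l i = uniq := by
  induction l generalizing i with
  | nil => rfl
  | cons s rest ih =>
    simp only [goA]
    rw [if_neg (by omega)]
    exact ih (i + 1) (lt_of_lt_of_le h (pySumLenA_take_mono onto i))
theorem findMatch_none_of_lt (o : Int) (l : List (List String)) (st : Int) (h : o < st) :
    findMatch o l st = none := by
  induction l generalizing st with
  | nil => rfl
  | cons s rest ih =>
    simp only [findMatch]
    rw [if_neg (by omega)]
    have : (0:Int) ≤ (s.length : Int) := by positivity
    exact ih (st + s.length) (by omega)
theorem goA_spec (onto : List (List String)) (o : Int) (uniq : List (List String))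
    (l : List (List String)) (i : Nat) (h : onto.take i ++ l = onto) :
    goA onto o uniq l i =
      (match findMatch o l (pySumLenA (onto.take i)) with
       | some s => if s ∈ uniq then uniq else uniq ++ [s]
       | none => uniq) := by
  induction l generalizing i with
  | nil => rfl
  | cons s rest ih =>
    have hlen : (onto.take i).length = i := by
      have hc := congrArg List.length h
      simp only [List.length_append, List.length_cons, List.length_take] at hc
      rw [List.length_take]
      omega
    have htake1 : onto.take (i + 1) = onto.take i ++ [s] := by
      conv_lhs => rw [← h]
      rw [← hlen, List.take_append]
      simp
    have hsum1 : pySumLenA (onto.take (i + 1)) = pySumLenA (onto.take i) + (s.length : Int) := by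
      rw [htake1, pySumLenA_app]; simp [pySumLenA]
    simp only [goA, findMatch]
    by_cases hr : pySumLenA (onto.take i) ≤ o ∧ o < pySumLenA (onto.take i) + (s.length : Int)
    · rw [if_pos hr]
      by_cases hm : s ∈ uniq
      · rw [if_neg (by tauto), goA_no_match onto o uniq rest (i + 1) (by omega)]
        show uniq = if s ∈ uniq then uniq else uniq ++ [s]
        rw [if_pos hm]
      · rw [if_pos ⟨hr.1, by omega, hm⟩]
        show uniq ++ [s] = if s ∈ uniq then uniq else uniq ++ [s]
        rw [if_neg hm]
    · rw [if_neg hr, if_neg (by omega)]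
      rw [ih (i + 1) (by rw [htake1]; simpa using h), hsum1]
theorem innerB_spec (s : List String) (w : List String) (d : PySem.Dict Int (List String)) (pos : Int) :
    (w.foldl (fun st2 _ => (st2.1.insert st2.2 s, st2.2 + 1)) (d, pos)).2 = pos + w.length ∧
    ∀ o, (w.foldl (fun st2 _ => (st2.1.insert st2.2 s, st2.2 + 1)) (d, pos)).1.get? o =
      if pos ≤ o ∧ o < pos + (w.length : Int) then some s else d.get? o := by
  induction w generalizing d pos with
  | nil =>
    refine ⟨by simp, fun o => ?_⟩
    rw [if_neg (by simp only [List.length_nil]; push_cast; omega)]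
    rfl
  | cons x rest ih =>
    obtain ⟨ih1, ih2⟩ := ih (d.insert pos s) (pos + 1)
    refine ⟨?_, fun o => ?_⟩
    · simp only [List.foldl_cons, List.length_cons] at *
      push_cast
      omega
    · simp only [List.foldl_cons, List.length_cons]
      rw [ih2 o, PySem.Dict.get?_insert]
      push_cast
      split_ifs <;> first | rfl | omega
theorem buildB_spec (onto : List (List String)) (d : PySem.Dict Int (List String)) (pos : Int) :
    ∀ o, (onto.foldl (fun st sentence =>
        sentence.foldl (fun st2 _ => (st2.1.insert st2.2 sentence, st2.2 + 1)) st) (d, pos)).1.get? o =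
      (match findMatch o onto pos with
       | some s => some s
       | none => d.get? o) := by
  induction onto generalizing d pos with
  | nil => intro o; rfl
  | cons s rest ih =>
    intro o
    simp only [List.foldl_cons, findMatch]
    obtain ⟨h2, h1⟩ := innerB_spec s s d pos
    rcases hQ : s.foldl (fun st2 _ => (st2.1.insert st2.2 s, st2.2 + 1)) (d, pos) with ⟨d1, p1⟩
    rw [hQ] at h2 h1
    dsimp only at h2 h1
    rw [hQ, ih d1 p1 o, h2, h1 o]
    by_cases hr : pos ≤ o ∧ o < pos + (s.length : Int)
    · rw [if_pos hr, if_pos hr, findMatch_none_of_lt o rest _ (by omega)]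
    · rw [if_neg hr, if_neg hr]
theorem buildB_get? (onto : List (List String)) (o : Int) :
    (buildB onto).1.get? o = findMatch o onto 0 := by
  rw [show (buildB onto) = onto.foldl (fun st sentence =>
    sentence.foldl (fun st2 _ => (st2.1.insert st2.2 sentence, st2.2 + 1)) st)
    (PySem.Dict.empty, 0) from rfl, buildB_spec]
  cases findMatch o onto 0 <;> simp
theorem fold_pair (onto : List (List String)) (offs : List (List Int)) :
    ∀ u : List (List String),
    (offs.foldl (fun st offset =>
      match PySem.List.pyGet? offset 0 with
      | some o =>
        match (buildB onto).1.get? o with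
        | some sentence =>
          if PySem.Set.contains st.2 sentence then st
          else (st.1 ++ [sentence], PySem.Set.add st.2 sentence)
        | none => st
      | none => st) (u, (u : PySem.Set (List String)))).1
    = offs.foldl (fun uniq offset =>
        match PySem.List.pyGet? offset 0 with
        | some o => goA onto o uniq onto 0
        | none => uniq) u := by
  induction offs with
  | nil => intro u; rfl
  | cons off rest ih =>
    intro u
    simp only [List.foldl_cons]
    cases hg : PySem.List.pyGet? off 0 with
    | none => exact ih u
    | some o =>
      show (rest.foldl _ (match (buildB onto).1.get? o with
          | some sentence =>
            if PySem.Set.contains (u : PySem.Set (List String)) sentence then (u, (u : PySem.Set (List String)))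
            else (u ++ [sentence], PySem.Set.add u sentence)
          | none => (u, u))).1 = rest.foldl _ (goA onto o u onto 0)
      rw [buildB_get?]
      have hA : goA onto o u onto 0 =
          (match findMatch o onto 0 with
           | some s => if s ∈ u then u else u ++ [s]
           | none => u) := by
        have := goA_spec onto o u onto 0 (by simp)
        simpa [pySumLenA] using this
      rw [hA]
      cases hf : findMatch o onto 0 with
      | none => exact ih u
      | some s =>
        dsimp only
        by_cases hm : s ∈ u
        · rw [if_pos ((PySem.Set.contains_iff u s).mpr hm), if_pos hm]
          exact ih u
        · rw [if_neg (by simpa using (PySem.Set.contains_iff u s).not.mpr hm), if_neg hm]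
          show (rest.foldl _ (u ++ [s], PySem.Set.add u s)).1 = _
          rw [PySem.Set.add_of_not_mem hm]
          exact ih (u ++ [s])

-- ===== VERDICT (by name: the statement is the Claim_ definition above) =====
theorem extract_coreference_sentences_ordered_spec : Claim_equal_extract_coreference_sentences_ordered := by
  intro ontonotes_sentence coreference_offsets _ _
  unfold Spec_extract_coreference_sentences_ordered
  exact (fold_pair ontonotes_sentence coreference_offsets []).symm
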